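-- pv_equiv track=rewrite | github.com/LaughD/Algorithm-Coding-test-Study | programmers/2019 카카오 개발자 겨울 인턴십/징검다리 건너기(Level3).py | solution
-- ===== SOURCE A (Python) =====
-- def solution(stones, k):
--     minimum = 1
--     maximum = max(stones)
--     while minimum <= maximum:
--         count = 0
--         middle = (minimum + maximum) // 2
--         for stone in stones:
--             if stone < middle:
--                 count += 1
--             else:
--                 count = 0
--             if count == k:
--                 maximum = middle - 1
--                 break
--         else:
--             answer = middle
--             minimum = middle + 1
--     return answer
-- ===== SOURCE B (Python) =====
-- def solution(stones, k):
--     n = len(stones)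
--     w = min(k, n)
--     pref = []
--     for j, x in enumerate(stones):
--         pref.append(x if j % w == 0 else max(pref[-1], x))
--     suff = []
--     for j in range(n - 1, -1, -1):
--         x = stones[j]
--         suff.append(x if j % w == w - 1 or j == n - 1 else max(suff[-1], x))
--     suff.reverse()
--     return min(max(suff[i], pref[i + w - 1]) for i in range(n - w + 1))
-- ===== Notes on version B (the rewrite author's own statement) =====
-- stated objective: alternative
-- what changed: replaces A's binary search over the answer range (each probe rescanning the whole list for a run of k stones below the candidate) by a direct linear-pass computation: per-block prefix and suffix maxima yield every size-min(k,n) window maximum, and the answer is the minimum of those.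
-- outside the precondition, e.g. on solution([5], -1): A returns 5, B raises IndexError
import Mathlib
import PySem

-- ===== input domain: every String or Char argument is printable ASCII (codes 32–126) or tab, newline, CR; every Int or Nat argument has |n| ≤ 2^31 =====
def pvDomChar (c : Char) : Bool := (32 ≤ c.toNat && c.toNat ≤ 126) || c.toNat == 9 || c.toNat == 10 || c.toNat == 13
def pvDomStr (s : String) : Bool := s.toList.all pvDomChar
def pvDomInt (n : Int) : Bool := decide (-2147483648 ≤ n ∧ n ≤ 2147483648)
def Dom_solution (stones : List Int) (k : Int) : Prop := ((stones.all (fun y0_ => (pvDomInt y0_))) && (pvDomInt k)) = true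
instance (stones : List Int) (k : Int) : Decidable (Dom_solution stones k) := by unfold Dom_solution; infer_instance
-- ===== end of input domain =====

-- B replaces A's binary search over the answer range (each probe rescanning the list) by a
-- direct computation: per-block prefix/suffix maxima give every size-min(k,n) window
-- maximum, and the answer is the minimum of those (alternative algorithm).


-- ===== PORT A =====
-- the inner 'for stone in stones' loop: returns true iff it breaks (count reaches k)
def innerScan (k middle : Int) : List Int → Int → Bool
  | [], _ => false
  | stone :: rest, count =>
    let count' := if stone < middle then count + 1 else (0 : Int)
    if count' = k then true else innerScan k middle rest count'

-- the 'while minimum <= maximum' loop of A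

-- the 'while minimum <= maximum' loop of A
def loopA (stones : List Int) (k minimum maximum answer : Int) : Int :=
  if h : minimum ≤ maximum then
    let middle := PySem.Int.floordiv (minimum + maximum) 2
    if innerScan k middle stones 0 then
      loopA stones k minimum (middle - 1) answer
    else
      loopA stones k (middle + 1) maximum middle
  else answer
termination_by (maximum + 1 - minimum).toNat
decreasing_by
  · have := PySem.Int.floordiv_two_mid_bounds h; omega
  · have := PySem.Int.floordiv_two_mid_bounds h; omega

-- Python's 'answer' is unbound until the first successful probe; Pre_ guarantees it is
-- assigned before the return, so the initial 0 below is never returned under Pre_.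

-- Python's 'answer' is unbound until the first successful probe; Pre_ guarantees it is
-- assigned before the return, so the initial 0 below is never returned under Pre_.
def solution (stones : List Int) (k : Int) : Int :=
  loopA stones k 1 ((PySem.List.max? stones (fun x => x)).getD 0) 0

-- ===== PORT B =====

-- ===== PORT B =====
def prefStep (w : Int) (acc : List Int) (jx : Int × Int) : List Int :=
  acc ++ [if PySem.Int.mod jx.1 w = 0 then jx.2
          else max ((PySem.List.pyGet? acc (-1)).getD 0) jx.2]

-- body of B's second loop: suff.append(x if j % w == w - 1 or j == n - 1 else max(suff[-1], x))

def suffStep (stones : List Int) (n w : Int) (acc : List Int) (j : Int) : List Int :=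
  let x := (PySem.List.pyGet? stones j).getD 0
  acc ++ [if PySem.Int.mod j w = w - 1 ∨ j = n - 1 then x
          else max ((PySem.List.pyGet? acc (-1)).getD 0) x]

def solution_alt (stones : List Int) (k : Int) : Int :=
  let n : Int := (stones.length : Int)
  let w : Int := min k n
  let pref : List Int := (PySem.List.enumerate stones).foldl (prefStep w) []
  let suffRev : List Int := (PySem.List.pyRange (n - 1) (-1) (-1)).foldl (suffStep stones n w) []
  let suff := suffRev.reverse
  let vals := (PySem.List.pyRange 0 (n - w + 1) 1).map
    (fun i => max ((PySem.List.pyGet? suff i).getD 0) ((PySem.List.pyGet? pref (i + w - 1)).getD 0))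
  (PySem.List.min? vals (fun x => x)).getD 0

-- v is the maximum of stones over index interval [a, b]

-- ===== PRECONDITION & SPEC =====
-- Pre_ excludes: empty stones (Python max([]) raises ValueError), non-positive k (a run length
-- below 1 is outside the problem's natural domain; there A happens to return max(stones) while
-- B raises), and inputs where some size-min(k,n) window has all stones < 1, on which A's
-- 'answer' is never assigned and the return raises UnboundLocalError.
def Pre_solution (stones : List Int) (k : Int) : Prop :=
  stones ≠ [] ∧ 1 ≤ k ∧
  ∀ i < stones.length, i + min k.toNat stones.length ≤ stones.length →
    ∃ j < stones.length, i ≤ j ∧ j < i + min k.toNat stones.length ∧ 1 ≤ stones.getD j 0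
instance (stones : List Int) (k : Int) : Decidable (Pre_solution stones k) := by
  unfold Pre_solution; infer_instance

def pvWitness_solution : List Int × Int := ([2, 4, 5, 3, 2, 1, 4, 2, 5, 1], 3)

def Spec_solution (stones : List Int) (k : Int) (out : Int) : Prop := out = solution_alt stones k
instance (stones : List Int) (k : Int) (out : Int) : Decidable (Spec_solution stones k out) := by unfold Spec_solution; infer_instance

-- ===== CLAIM (what is proved, stated in full; the proofs are below) =====
def Claim_equal_solution : Prop := ∀ (stones : List Int) (k : Int), Dom_solution stones k → Pre_solution stones k → Spec_solution stones k (solution stones k)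

-- ===== LEMMAS AND PROOFS =====

-- 'some size-kk window of stones lies entirely below mid'
def winBad (stones : List Int) (kk : Nat) (mid : Int) : Prop :=
  ∃ i, i + kk ≤ stones.length ∧ ∀ j, i ≤ j → j < i + kk → stones.getD j 0 < mid

lemma winBad_cons (s : Int) (rest : List Int) (kk : Nat) (mid : Int) (hkk : 1 ≤ kk) :
    winBad (s :: rest) kk mid ↔
      ((kk ≤ rest.length + 1 ∧ s < mid ∧ ∀ j, j + 1 < kk → rest.getD j 0 < mid) ∨ winBad rest kk mid) := by
  constructor
  · rintro ⟨i, hi, hall⟩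
    rcases Nat.eq_zero_or_pos i with rfl | hipos
    · left
      refine ⟨by simpa using hi, by simpa using hall 0 (by omega) (by omega), fun j hj => ?_⟩
      have := hall (j + 1) (by omega) (by omega)
      simpa using this
    · right
      obtain ⟨i', rfl⟩ : ∃ i', i = i' + 1 := ⟨i - 1, by omega⟩
      refine ⟨i', by simp at hi ⊢; omega, fun j hj1 hj2 => ?_⟩
      have := hall (j + 1) (by omega) (by omega)
      simpa using this
  · rintro (⟨hlen, hs, hall⟩ | ⟨i, hi, hall⟩)
    · refine ⟨0, by simpa using hlen, fun j hj1 hj2 => ?_⟩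
      cases j with
      | zero => simpa using hs
      | succ j => simpa using hall j (by omega)
    · refine ⟨i + 1, by simp at hi ⊢; omega, fun j hj1 hj2 => ?_⟩
      obtain ⟨j', rfl⟩ : ∃ j', j = j' + 1 := ⟨j - 1, by omega⟩
      simpa using hall j' (by omega) (by omega)

lemma scan_iff (mid k : Int) (hk : 1 ≤ k) :
    ∀ (l : List Int) (c : Int), 0 ≤ c → c < k →
      (innerScan k mid l c = true ↔
        (((k - c).toNat ≤ l.length ∧ ∀ j < (k - c).toNat, l.getD j 0 < mid) ∨ winBad l k.toNat mid)) := by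
  intro l
  induction l with
  | nil =>
    intro c hc0 hck
    rw [show innerScan k mid [] c = false from rfl]
    simp only [Bool.false_eq_true, false_iff]
    rintro (⟨h1, _⟩ | ⟨i, hi, _⟩)
    · simp at h1; omega
    · simp at hi; omega
  | cons s rest ih =>
    intro c hc0 hck
    by_cases hs : s < mid
    · by_cases he : c + 1 = k
      · rw [show innerScan k mid (s :: rest) c = true by simp [innerScan, if_pos hs, he]]
        simp only [true_iff]
        left
        refine ⟨by simp; omega, fun j hj => ?_⟩
        have : j = 0 := by omega
        subst this; simpa using hs
      · rw [show innerScan k mid (s :: rest) c = innerScan k mid rest (c + 1) by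
            simp [innerScan, if_pos hs, he]]
        rw [ih (c + 1) (by omega) (by omega)]
        rw [winBad_cons s rest k.toNat mid (by omega)]
        constructor
        · rintro (⟨h1, h2⟩ | hB)
          · left
            refine ⟨by simp; omega, fun j hj => ?_⟩
            cases j with
            | zero => simpa using hs
            | succ j => rw [List.getD_cons_succ]; exact h2 j (by omega)
          · right; right; exact hB
        · rintro (⟨h1, h2⟩ | ⟨h1, h2, h3⟩ | hB)
          · left
            refine ⟨by simp at h1; omega, fun j hj => ?_⟩
            have := h2 (j + 1) (by omega)
            rw [List.getD_cons_succ] at this; exact this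
          · left
            refine ⟨by omega, fun j hj => h3 j (by omega)⟩
          · right; exact hB
    · rw [show innerScan k mid (s :: rest) c = innerScan k mid rest 0 by
          simp [innerScan, if_neg hs]; omega]
      rw [ih 0 le_rfl (by omega)]
      rw [winBad_cons s rest k.toNat mid (by omega)]
      constructor
      · rintro (⟨h1, h2⟩ | hB)
        · right; right
          exact ⟨0, by simp at h1 ⊢; omega, fun j hj1 hj2 => h2 j (by omega)⟩
        · right; right; exact hB
      · rintro (⟨h1, h2⟩ | ⟨h1, h2, h3⟩ | hB)
        · exfalso
          have := h2 0 (by omega)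
          rw [List.getD_cons_zero] at this; exact hs this
        · exact absurd h2 hs
        · right; exact hB

lemma scan_zero_iff (mid k : Int) (hk : 1 ≤ k) (l : List Int) :
    innerScan k mid l 0 = true ↔ winBad l k.toNat mid := by
  rw [scan_iff mid k hk l 0 le_rfl (by omega)]
  constructor
  · rintro (⟨h1, h2⟩ | hB)
    · exact ⟨0, by omega, fun j hj1 hj2 => h2 j (by omega)⟩
    · exact hB
  · exact fun hB => Or.inr hB

def IsMaxOf (stones : List Int) (v : Int) (a b : Nat) : Prop :=
  (∃ j, a ≤ j ∧ j ≤ b ∧ stones.getD j 0 = v) ∧ (∀ j, a ≤ j → j ≤ b → stones.getD j 0 ≤ v)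

lemma IsMaxOf.unique {stones : List Int} {v v' : Int} {a b : Nat}
    (h : IsMaxOf stones v a b) (h' : IsMaxOf stones v' a b) : v = v' := by
  obtain ⟨⟨j, hj1, hj2, hj3⟩, hall⟩ := h
  obtain ⟨⟨j', hj1', hj2', hj3'⟩, hall'⟩ := h'
  have := hall' j hj1 hj2
  have := hall j' hj1' hj2'
  omega

lemma IsMaxOf.merge {stones : List Int} {v1 v2 : Int} {a b1 a2 b : Nat}
    (h1 : IsMaxOf stones v1 a b1) (h2 : IsMaxOf stones v2 a2 b)
    (ha : a ≤ a2) (hb : b1 ≤ b) (hcov : a2 ≤ b1 + 1) : IsMaxOf stones (max v1 v2) a b := by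
  obtain ⟨⟨j1, hj11, hj12, hj13⟩, hall1⟩ := h1
  obtain ⟨⟨j2, hj21, hj22, hj23⟩, hall2⟩ := h2
  constructor
  · rcases le_total v1 v2 with h | h
    · exact ⟨j2, by omega, by omega, by omega⟩
    · exact ⟨j1, by omega, by omega, by omega⟩
  · intro j hja hjb
    by_cases hc : j ≤ b1
    · have := hall1 j hja hc; omega
    · have := hall2 j (by omega) hjb; omega

lemma IsMaxOf.single {stones : List Int} {j : Nat} : IsMaxOf stones (stones.getD j 0) j j := by
  constructor
  · exact ⟨j, le_rfl, le_rfl, rfl⟩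
  · intro j' h1 h2
    have h : j' = j := by omega
    rw [h]

-- helpers about % with variable modulus

lemma mod_succ (j kk : Nat) (hkk : 1 ≤ kk) :
    (j + 1) % kk = if j % kk = kk - 1 then 0 else j % kk + 1 := by
  have h1 : j % kk < kk := Nat.mod_lt _ (by omega)
  rw [Nat.add_mod]
  split_ifs with h
  · rcases Nat.eq_or_lt_of_le hkk with h' | h'
    · rw [← h']; simp [Nat.mod_one]
    · rw [h, Nat.mod_eq_of_lt h']
      have he : kk - 1 + 1 = kk := by omega
      rw [he, Nat.mod_self]
  · rcases Nat.eq_or_lt_of_le hkk with h' | h'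
    · exfalso; rw [← h'] at h; exact h (Nat.mod_one j)
    · rw [Nat.mod_eq_of_lt h']
      exact Nat.mod_eq_of_lt (by omega)

lemma getD_append_lt (l l' : List Int) (j : Nat) (h : j < l.length) :
    (l ++ l').getD j 0 = l.getD j 0 := by
  simp [List.getD_eq_getElem?_getD, List.getElem?_append_left h]

lemma getD_append_len (l : List Int) (v : Int) : (l ++ [v]).getD l.length 0 = v := by
  simp [List.getD_eq_getElem?_getD]

lemma pref_inv (stones : List Int) (kk : Nat) (hkk : 1 ≤ kk) :
    ∀ (xs : List Int) (s : Nat) (acc : List Int),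
      xs = stones.drop s → s ≤ stones.length → acc.length = s →
      (∀ j, j < s → IsMaxOf stones (acc.getD j 0) (j - j % kk) j) →
      ((PySem.List.enumerate xs (s : Int)).foldl (prefStep (kk : Int)) acc).length = stones.length ∧
      ∀ j, j < stones.length →
        IsMaxOf stones (((PySem.List.enumerate xs (s : Int)).foldl (prefStep (kk : Int)) acc).getD j 0)
          (j - j % kk) j := by
  intro xs
  induction xs with
  | nil =>
    intro s acc hxs hsle hlen hinv
    have hsl : stones.length = s := by
      have := congrArg List.length hxs
      simp [List.length_drop] at this
      omega
    rw [show PySem.List.enumerate ([] : List Int) (s : Int) = [] from rfl]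
    simp only [List.foldl_nil]
    exact ⟨by omega, fun j hj => hinv j (by omega)⟩
  | cons x t ih =>
    intro s acc hxs hsle hlen hinv
    have hs : s < stones.length := by
      have := congrArg List.length hxs
      simp [List.length_drop] at this
      omega
    have hx : x = stones.getD s 0 := by
      have h0 : (stones.drop s)[0]? = some x := by rw [← hxs]; rfl
      rw [List.getElem?_drop] at h0
      rw [Nat.add_zero] at h0
      simp [List.getD_eq_getElem?_getD, h0]
    have ht : t = stones.drop (s + 1) := by
      rw [List.drop_add_one_eq_tail_drop, ← hxs]; rfl
    rw [PySem.List.enumerate_cons]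
    simp only [List.foldl_cons]
    -- the value appended at step s
    have hmodc : PySem.Int.mod ((s : Nat) : Int) ((kk : Nat) : Int) = ((s % kk : Nat) : Int) :=
      PySem.Int.mod_natCast s kk
    by_cases hz : s % kk = 0
    · have hstep : prefStep (kk : Int) acc ((s : Int), x) = acc ++ [x] := by
        simp [prefStep, hmodc, hz]
      rw [hstep]
      have hnext : (s : Int) + 1 = ((s + 1 : Nat) : Int) := by push_cast; ring
      rw [hnext]
      refine ih (s + 1) (acc ++ [x]) ht (by omega) (by simp [hlen]) ?_
      intro j hj
      rcases Nat.lt_or_ge j s with hjs | hjs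
      · rw [getD_append_lt acc [x] j (by omega)]
        exact hinv j hjs
      · have hjeq : j = s := by omega
        subst hjeq
        have hge : (acc ++ [x]).getD j 0 = x := by rw [← hlen]; exact getD_append_len acc x
        rw [hge, hx]
        have hbs0 : j - j % kk = j := by omega
        rw [hbs0]
        exact IsMaxOf.single
    · -- s % kk ≠ 0, hence s ≥ 1 and the last accumulated value is extended
      have hs1 : 1 ≤ s := by
        rcases Nat.eq_zero_or_pos s with rfl | h
        · simp at hz
        · omega
      have hlast : (PySem.List.pyGet? acc (-1)).getD 0 = acc.getD (s - 1) 0 := by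
        rw [PySem.List.pyGet?_neg_one, List.getLast?_eq_getElem?, hlen]
        simp [List.getD_eq_getElem?_getD]
      have hstep : prefStep (kk : Int) acc ((s : Int), x) = acc ++ [max (acc.getD (s - 1) 0) x] := by
        simp only [prefStep, hmodc, hlast]
        rw [if_neg (by exact_mod_cast hz)]
      rw [hstep]
      have hnext : (s : Int) + 1 = ((s + 1 : Nat) : Int) := by push_cast; ring
      rw [hnext]
      refine ih (s + 1) _ ht (by omega) (by simp [hlen]) ?_
      intro j hj
      rcases Nat.lt_or_ge j s with hjs | hjs
      · rw [getD_append_lt acc _ j (by omega)]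
        exact hinv j hjs
      · have hjeq : j = s := by omega
        subst hjeq
        have hge : (acc ++ [max (acc.getD (j - 1) 0) x]).getD j 0 = max (acc.getD (j - 1) 0) x := by
          rw [← hlen]; exact getD_append_len acc _
        rw [hge]
        -- block start of s equals block start of s-1
        have hmod := mod_succ (j - 1) kk hkk
        rw [show j - 1 + 1 = j by omega] at hmod
        have hltm : (j - 1) % kk < kk := Nat.mod_lt _ (by omega)
        have hlem : (j - 1) % kk ≤ j - 1 := Nat.mod_le _ _
        have hnm : ¬ (j - 1) % kk = kk - 1 := by
          intro hcc; rw [if_pos hcc] at hmod; omega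
        rw [if_neg hnm] at hmod
        have hprev := hinv (j - 1) (by omega)
        have hsingle : IsMaxOf stones (stones.getD j 0) j j := IsMaxOf.single
        have hmerge := IsMaxOf.merge hprev hsingle (by omega) (by omega) (by omega)
        rw [hx]
        have hbs : j - 1 - (j - 1) % kk = j - j % kk := by omega
        rw [← hbs]
        exact hmerge

lemma pyRange_down (n : Nat) :
    PySem.List.pyRange ((n : Int) - 1) (-1) (-1) = (List.range n).map (fun t => ((n : Int) - 1 - (t : Nat))) := by
  rcases Nat.eq_zero_or_pos n with rfl | hn
  · simp [PySem.List.pyRange]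
  · simp only [PySem.List.pyRange]
    rw [if_neg (by omega), if_neg (by omega), if_pos (by omega)]
    have hc : (((n : Int) - 1 - -1 + - -1 - 1) / - -1).toNat = n := by
      norm_num
    rw [hc]
    apply List.map_congr_left
    intro t _
    ring

-- last index of the length-kk block containing j (clipped to the list)

-- last index of the length-kk block containing j (clipped to the list)
def blockEnd (n kk j : Nat) : Nat := min (j - j % kk + (kk - 1)) (n - 1)

lemma mod_plus_block (i kk : Nat) (hkk : 1 ≤ kk) (h : i % kk = 0) : (i + (kk - 1)) % kk = kk - 1 := by
  rw [Nat.add_mod, h, Nat.zero_add, Nat.mod_mod_of_dvd _ dvd_rfl]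
  exact Nat.mod_eq_of_lt (by omega)

lemma mod_plus_block' (i kk : Nat) (hkk : 1 ≤ kk) (h : 1 ≤ i % kk) : (i + (kk - 1)) % kk = i % kk - 1 := by
  have hlt : i % kk < kk := Nat.mod_lt _ (by omega)
  rw [Nat.add_mod, Nat.mod_eq_of_lt (show kk - 1 < kk by omega)]
  have h2 : i % kk + (kk - 1) = (i % kk - 1) + kk := by omega
  rw [h2, Nat.add_mod_right]
  exact Nat.mod_eq_of_lt (by omega)

lemma suff_inv (stones : List Int) (kk : Nat) (hkk : 1 ≤ kk) :
    ∀ (c : Nat), ∀ (s : Nat) (acc : List Int),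
      c + s = stones.length → acc.length = s →
      (∀ t, t < s → IsMaxOf stones (acc.getD t 0) (stones.length - 1 - t)
          (blockEnd stones.length kk (stones.length - 1 - t))) →
      (((List.range c).map (fun u => ((stones.length : Int) - 1 - ((s + u : Nat) : Int)))).foldl
          (suffStep stones (stones.length : Int) (kk : Int)) acc).length = stones.length ∧
      ∀ t, t < stones.length →
        IsMaxOf stones
          ((((List.range c).map (fun u => ((stones.length : Int) - 1 - ((s + u : Nat) : Int)))).foldl
              (suffStep stones (stones.length : Int) (kk : Int)) acc).getD t 0)
          (stones.length - 1 - t) (blockEnd stones.length kk (stones.length - 1 - t)) := by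
  intro c
  induction c with
  | zero =>
    intro s acc hcs hlen hinv
    simp only [List.range_zero, List.map_nil, List.foldl_nil]
    exact ⟨by omega, fun t ht => hinv t (by omega)⟩
  | succ c ih =>
    intro s acc hcs hlen hinv
    set n := stones.length with hn
    have hsn : s < n := by omega
    rw [List.range_succ_eq_map]
    simp only [List.map_cons, List.foldl_cons, List.map_map]
    set jN : Nat := n - 1 - s with hjN
    have hjlt : jN < n := by omega
    have hjcast : (n : Int) - 1 - ((s + 0 : Nat) : Int) = ((jN : Nat) : Int) := by
      simp only [Nat.add_zero]; omega
    have hx : (PySem.List.pyGet? stones ((jN : Nat) : Int)).getD 0 = stones.getD jN 0 := by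
      rw [PySem.List.pyGet?_natCast]
      simp [List.getD_eq_getElem?_getD]
    have hmodc : PySem.Int.mod ((jN : Nat) : Int) ((kk : Nat) : Int) = ((jN % kk : Nat) : Int) :=
      PySem.Int.mod_natCast jN kk
    have hcond : (PySem.Int.mod ((jN : Nat) : Int) ((kk : Nat) : Int) = ((kk : Nat) : Int) - 1 ∨
          ((jN : Nat) : Int) = (n : Int) - 1) ↔ (jN % kk = kk - 1 ∨ jN = n - 1) := by
      rw [hmodc]
      constructor
      · rintro (h | h)
        · left; omega
        · right; omega
      · rintro (h | h)
        · left; omega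
        · right; omega
    -- the element appended for index jN
    by_cases hreset : jN % kk = kk - 1 ∨ jN = n - 1
    · have hstep : suffStep stones (n : Int) (kk : Int) acc ((n : Int) - 1 - ((s + 0 : Nat) : Int)) =
          acc ++ [stones.getD jN 0] := by
        rw [hjcast]
        simp only [suffStep, hx]
        rw [if_pos (hcond.mpr hreset)]
      rw [hstep]
      have hmap : (List.range c).map ((fun u => ((n : Int) - 1 - ((s + u : Nat) : Int))) ∘ Nat.succ) =
          (List.range c).map (fun u => ((n : Int) - 1 - (((s + 1) + u : Nat) : Int))) := by
        apply List.map_congr_left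
        intro u _
        simp only [Function.comp]
        push_cast; ring_nf
      rw [hmap]
      refine ih (s + 1) _ (by omega) (by simp [hlen]) ?_
      intro t ht
      rcases Nat.lt_or_ge t s with hts | hts
      · have hge : (acc ++ [stones.getD jN 0]).getD t 0 = acc.getD t 0 :=
          getD_append_lt acc _ t (by omega)
        rw [hge]
        exact hinv t hts
      · have hteq : t = s := by omega
        subst hteq
        have hge : (acc ++ [stones.getD jN 0]).getD t 0 = stones.getD jN 0 := by
          rw [← hlen]; exact getD_append_len acc _
        rw [hge]
        have hbe : blockEnd n kk jN = jN := by
          rcases hreset with h | h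
          · have h1 : jN % kk ≤ jN := Nat.mod_le _ _
            simp only [blockEnd]; omega
          · have h1 : jN % kk < kk := Nat.mod_lt _ (by omega)
            have h2 : jN % kk ≤ jN := Nat.mod_le _ _
            simp only [blockEnd]; omega
        rw [show n - 1 - t = jN from rfl, hbe]
        exact IsMaxOf.single
    · push Not at hreset
      obtain ⟨hnotlast, hnotend⟩ := hreset
      have hs1 : 1 ≤ s := by omega
      have hlast : (PySem.List.pyGet? acc (-1)).getD 0 = acc.getD (s - 1) 0 := by
        rw [PySem.List.pyGet?_neg_one, List.getLast?_eq_getElem?, hlen]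
        simp [List.getD_eq_getElem?_getD]
      have hstep : suffStep stones (n : Int) (kk : Int) acc ((n : Int) - 1 - ((s + 0 : Nat) : Int)) =
          acc ++ [max (acc.getD (s - 1) 0) (stones.getD jN 0)] := by
        rw [hjcast]
        simp only [suffStep, hx, hlast]
        rw [if_neg (by rw [hcond]; push Not; exact ⟨hnotlast, hnotend⟩)]
      rw [hstep]
      have hmap : (List.range c).map ((fun u => ((n : Int) - 1 - ((s + u : Nat) : Int))) ∘ Nat.succ) =
          (List.range c).map (fun u => ((n : Int) - 1 - (((s + 1) + u : Nat) : Int))) := by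
        apply List.map_congr_left
        intro u _
        simp only [Function.comp]
        push_cast; ring_nf
      rw [hmap]
      refine ih (s + 1) _ (by omega) (by simp [hlen]) ?_
      intro t ht
      rcases Nat.lt_or_ge t s with hts | hts
      · have hge : (acc ++ [max (acc.getD (s - 1) 0) (stones.getD jN 0)]).getD t 0 = acc.getD t 0 :=
          getD_append_lt acc _ t (by omega)
        rw [hge]
        exact hinv t hts
      · have hteq : t = s := by omega
        subst hteq
        have hge : (acc ++ [max (acc.getD (t - 1) 0) (stones.getD jN 0)]).getD t 0 =
            max (acc.getD (t - 1) 0) (stones.getD jN 0) := by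
          rw [← hlen]; exact getD_append_len acc _
        rw [hge]
        -- previous element covers [jN+1, blockEnd jN]
        have hprev := hinv (t - 1) (by omega)
        have hidx : n - 1 - (t - 1) = jN + 1 := by omega
        rw [hidx] at hprev
        have hmlt : jN % kk < kk := Nat.mod_lt _ (by omega)
        have hmle : jN % kk ≤ jN := Nat.mod_le _ _
        have hsucc : (jN + 1) % kk = jN % kk + 1 := by
          rw [mod_succ jN kk hkk, if_neg hnotlast]
        have hbe : blockEnd n kk (jN + 1) = blockEnd n kk jN := by
          simp only [blockEnd, hsucc]
          have h1 : jN + 1 - (jN % kk + 1) = jN - jN % kk := by omega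
          rw [h1]
        rw [hbe] at hprev
        have hbege : jN ≤ blockEnd n kk jN := by
          simp only [blockEnd]; omega
        have hmerge := IsMaxOf.merge (IsMaxOf.single (j := jN)) hprev
          (by omega) hbege (by omega)
        rw [show n - 1 - t = jN from rfl]
        rw [max_comm]
        exact hmerge

lemma mem_window_iff (stones : List Int) (i kk : Nat) (hik : i + kk ≤ stones.length) (y : Int) :
    y ∈ (stones.drop i).take kk ↔ ∃ j, j < kk ∧ stones.getD (i + j) 0 = y := by
  rw [List.mem_iff_getElem]
  have hlen : ((stones.drop i).take kk).length = kk := by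
    simp [List.length_take, List.length_drop]; omega
  constructor
  · rintro ⟨j, hj, rfl⟩
    rw [hlen] at hj
    refine ⟨j, hj, ?_⟩
    rw [List.getElem_take, List.getElem_drop]
    rw [List.getD_eq_getElem stones 0 (by omega)]
  · rintro ⟨j, hj, hy⟩
    refine ⟨j, by omega, ?_⟩
    rw [List.getElem_take, List.getElem_drop]
    rw [List.getD_eq_getElem stones 0 (by omega)] at hy
    exact hy

lemma wmax_isMaxOf (stones : List Int) (i kk : Nat) (hkk : 1 ≤ kk) (hik : i + kk ≤ stones.length) :
    IsMaxOf stones ((PySem.List.max? ((stones.drop i).take kk) (fun x => x)).getD 0) i (i + kk - 1) := by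
  have hne : (stones.drop i).take kk ≠ [] := by
    have hl : ((stones.drop i).take kk).length = kk := by
      simp [List.length_take, List.length_drop]; omega
    intro h; rw [h] at hl; simp at hl; omega
  obtain ⟨q, hq⟩ : ∃ q, PySem.List.max? ((stones.drop i).take kk) (fun x : Int => x) = some q := by
    cases hr : PySem.List.max? ((stones.drop i).take kk) (fun x : Int => x) with
    | none => exact absurd ((PySem.List.max?_eq_none_iff _ _).mp hr) hne
    | some q => exact ⟨q, rfl⟩
  rw [hq]
  simp only [Option.getD_some]
  constructor
  · obtain ⟨j, hj, hv⟩ := (mem_window_iff stones i kk hik q).mp (PySem.List.max?_mem hq)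
    exact ⟨i + j, by omega, by omega, hv⟩
  · intro j hj1 hj2
    have hmem : stones.getD j 0 ∈ (stones.drop i).take kk :=
      (mem_window_iff stones i kk hik _).mpr ⟨j - i, by omega, by rw [show i + (j - i) = j by omega]⟩
    exact PySem.List.max?_isMax hq _ hmem

lemma le_winmax_iff (stones : List Int) (i kk : Nat) (hkk : 1 ≤ kk) (hik : i + kk ≤ stones.length) (mid : Int) :
    mid ≤ (PySem.List.max? ((stones.drop i).take kk) (fun x => x)).getD 0 ↔
      ∃ j, j < kk ∧ mid ≤ stones.getD (i + j) 0 := by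
  have hne : (stones.drop i).take kk ≠ [] := by
    have : ((stones.drop i).take kk).length = kk := by
      simp [List.length_take, List.length_drop]; omega
    intro h; rw [h] at this; simp at this; omega
  obtain ⟨m, hm⟩ : ∃ m, PySem.List.max? ((stones.drop i).take kk) (fun x => x) = some m := by
    cases hmx : PySem.List.max? ((stones.drop i).take kk) (fun x : Int => x) with
    | none => exact absurd ((PySem.List.max?_eq_none_iff _ _).mp hmx) hne
    | some m => exact ⟨m, rfl⟩
  rw [hm]; simp only [Option.getD_some]
  constructor
  · intro hle
    have hmem := PySem.List.max?_mem hm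
    obtain ⟨j, hj, hy⟩ := (mem_window_iff stones i kk hik m).mp hmem
    exact ⟨j, hj, by omega⟩
  · rintro ⟨j, hj, hy⟩
    have hmem : stones.getD (i + j) 0 ∈ (stones.drop i).take kk :=
      (mem_window_iff stones i kk hik _).mpr ⟨j, hj, rfl⟩
    have := PySem.List.max?_isMax hm _ hmem
    exact le_trans hy this

lemma getD_reverse (l : List Int) (i : Nat) (h : i < l.length) :
    l.reverse.getD i 0 = l.getD (l.length - 1 - i) 0 := by
  rw [List.getD_eq_getElem l.reverse 0 (by simpa using h)]
  rw [List.getElem_reverse]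
  rw [List.getD_eq_getElem l 0 (by omega)]

lemma alt_eq_min (stones : List Int) (k : Int) (hne : stones ≠ []) (hk : 1 ≤ k) :
    solution_alt stones k =
      (PySem.List.min? ((List.range (stones.length - min k.toNat stones.length + 1)).map
        (fun i => (PySem.List.max? ((stones.drop i).take (min k.toNat stones.length)) (fun x => x)).getD 0))
        (fun x => x)).getD 0 := by
  set n := stones.length with hn
  have hn1 : 1 ≤ n := by
    cases stones with
    | nil => exact absurd rfl hne
    | cons a t => simp [hn]
  set kk : Nat := min k.toNat n with hkk
  have hkk1 : 1 ≤ kk := by omega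
  have hkkn : kk ≤ n := by omega
  set cnt : Nat := n - kk + 1 with hcnt
  have hw : min k ((n : Nat) : Int) = ((kk : Nat) : Int) := by omega
  -- pref facts
  have hpref := pref_inv stones kk hkk1 stones 0 [] (by simp) (by omega) rfl (by intro j hj; omega)
  simp only [Nat.cast_zero] at hpref
  obtain ⟨hplen, hpval⟩ := hpref
  -- suff facts
  have hsuff := suff_inv stones kk hkk1 n 0 [] (by omega) rfl (by intro t ht; omega)
  obtain ⟨hslen, hsval⟩ := hsuff
  simp only [solution_alt, ← hn, hw]
  set pref : List Int := (PySem.List.enumerate stones).foldl (prefStep ((kk : Nat) : Int)) [] with hprefd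
  set suffRev : List Int := ((List.range n).map (fun u => ((n : Int) - 1 - ((0 + u : Nat) : Int)))).foldl
      (suffStep stones ((n : Nat) : Int) ((kk : Nat) : Int)) [] with hsuffd
  have hrange : PySem.List.pyRange ((n : Int) - 1) (-1) (-1) =
      (List.range n).map (fun u => ((n : Int) - 1 - ((0 + u : Nat) : Int))) := by
    rw [pyRange_down n]
    apply List.map_congr_left
    intro t _
    simp
  rw [hrange]
  have hc : ((n : Int) - (kk : Int) + 1) = ((cnt : Nat) : Int) := by omega
  rw [hc, PySem.List.pyRange_zero_natCast, List.map_map]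
  congr 2
  apply List.map_congr_left
  intro i hi
  have hicnt : i < cnt := List.mem_range.mp hi
  have hik : i + kk ≤ n := by omega
  simp only [Function.comp]
  -- the suff component
  have hsufget : (PySem.List.pyGet? suffRev.reverse ((i : Nat) : Int)).getD 0 = suffRev.getD (n - 1 - i) 0 := by
    rw [PySem.List.pyGet?_natCast]
    rw [← List.getD_eq_getElem?_getD]
    have hrl : suffRev.length = n := hslen
    rw [getD_reverse suffRev i (by omega), hrl]
  have hA : IsMaxOf stones (suffRev.getD (n - 1 - i) 0) i (blockEnd n kk i) := by
    have := hsval (n - 1 - i) (by omega)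
    rw [show n - 1 - (n - 1 - i) = i by omega] at this
    exact this
  -- the pref component
  have hprefget : (PySem.List.pyGet? pref (((i : Nat) : Int) + ((kk : Nat) : Int) - 1)).getD 0 =
      pref.getD (i + kk - 1) 0 := by
    rw [show ((i : Nat) : Int) + ((kk : Nat) : Int) - 1 = (((i + kk - 1 : Nat)) : Int) by omega]
    rw [PySem.List.pyGet?_natCast]
    rw [← List.getD_eq_getElem?_getD]
  have hB : IsMaxOf stones (pref.getD (i + kk - 1) 0) ((i + kk - 1) - (i + kk - 1) % kk) (i + kk - 1) :=
    hpval (i + kk - 1) (by omega)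
  -- merge side conditions
  have hmlt : i % kk < kk := Nat.mod_lt _ (by omega)
  have hmle : i % kk ≤ i := Nat.mod_le _ _
  have hikk : i + kk - 1 = i + (kk - 1) := by omega
  have hbs : (i + kk - 1) - (i + kk - 1) % kk = if i % kk = 0 then i else i + kk - i % kk := by
    by_cases hr : i % kk = 0
    · rw [if_pos hr, hikk, mod_plus_block i kk hkk1 hr]
      omega
    · rw [if_neg hr, hikk, mod_plus_block' i kk hkk1 (by omega)]
      omega
  have hbe : blockEnd n kk i = if i % kk = 0 then min (i + (kk - 1)) (n - 1) else i - i % kk + (kk - 1) := by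
    by_cases hr : i % kk = 0
    · rw [if_pos hr]; simp only [blockEnd, hr]; omega
    · rw [if_neg hr]; simp only [blockEnd]
      have : i - i % kk + (kk - 1) ≤ n - 1 := by omega
      omega
  have hmerge : IsMaxOf stones
      (max (suffRev.getD (n - 1 - i) 0) (pref.getD (i + kk - 1) 0)) i (i + kk - 1) := by
    refine IsMaxOf.merge hA hB ?_ ?_ ?_
    · rw [hbs]; split_ifs <;> omega
    · rw [hbe]; split_ifs <;> omega
    · rw [hbs, hbe]; split_ifs <;> omega
  have hwspec := wmax_isMaxOf stones i kk hkk1 hik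
  rw [hsufget, hprefget]
  exact IsMaxOf.unique hmerge hwspec

lemma loopA_eq (stones : List Int) (k W M : Int)
    (H : ∀ m, 1 ≤ m → m ≤ M → (innerScan k m stones 0 = false ↔ m ≤ W))
    (hW1 : 1 ≤ W) :
    ∀ fuel : Nat, ∀ minimum maximum answer : Int, (maximum + 1 - minimum).toNat ≤ fuel →
      1 ≤ minimum → maximum ≤ M → minimum - 1 ≤ W → W ≤ maximum →
      (minimum = 1 ∨ answer = minimum - 1) →
      loopA stones k minimum maximum answer = W := by
  intro fuel
  induction fuel with
  | zero =>
    intro minimum maximum answer hf h1 hM hWlo hWhi hans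
    rw [loopA, dif_neg (by omega)]
    rcases hans with h | h <;> omega
  | succ f ihf =>
    intro minimum maximum answer hf h1 hM hWlo hWhi hans
    by_cases hmm : minimum ≤ maximum
    · rw [loopA, dif_pos hmm]
      have hmid := PySem.Int.floordiv_two_mid_bounds hmm
      set middle := PySem.Int.floordiv (minimum + maximum) 2 with hmdef
      by_cases hb : innerScan k middle stones 0 = true
      · rw [if_pos hb]
        have hnot : ¬ middle ≤ W := by
          intro hle
          have := (H middle (by omega) (by omega)).mpr hle
          rw [hb] at this; exact Bool.true_eq_false.mp this
        exact ihf minimum (middle - 1) answer (by omega) h1 (by omega) hWlo (by omega) hans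
      · rw [if_neg hb]
        have hle : middle ≤ W := (H middle (by omega) (by omega)).mp (by simpa using hb)
        exact ihf (middle + 1) maximum middle (by omega) (by omega) hM (by omega) hWhi (Or.inr (by omega))
    · rw [loopA, dif_neg hmm]
      rcases hans with h | h <;> omega

-- ===== VERDICT (by name: the statement is the Claim_ definition above) =====

-- ===== VERDICT (by name: the statement is the Claim_ definition above) =====
theorem solution_spec : Claim_equal_solution := by
  intro stones k _hdom hpre
  unfold Spec_solution
  obtain ⟨hne, hk, hwin⟩ := hpre
  set n := stones.length with hn
  have hn1 : 1 ≤ n := by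
    cases stones with
    | nil => exact absurd rfl hne
    | cons a t => simp [hn]
  set kk : Nat := min k.toNat n with hkk
  have hkk1 : 1 ≤ kk := by omega
  have hkkn : kk ≤ n := by omega
  set cnt : Nat := n - kk + 1 with hcnt
  set wmax : Nat → Int :=
    fun i => (PySem.List.max? ((stones.drop i).take kk) (fun x => x)).getD 0 with hwmax
  set vals : List Int := (List.range cnt).map wmax with hvals
  -- B computes min over vals
  have halt : solution_alt stones k = (PySem.List.min? vals (fun x => x)).getD 0 :=
    alt_eq_min stones k hne hk
  -- min of vals
  have hvne : vals ≠ [] := by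
    simp [hvals, List.map_eq_nil_iff, List.range_eq_nil]
  obtain ⟨m, hm⟩ : ∃ m, PySem.List.min? vals (fun x : Int => x) = some m := by
    cases hmx : PySem.List.min? vals (fun x : Int => x) with
    | none => exact absurd ((PySem.List.min?_eq_none_iff _ _).mp hmx) hvne
    | some m => exact ⟨m, rfl⟩
  have hWval : solution_alt stones k = m := by rw [halt, hm]; rfl
  obtain ⟨i0, hi0, hwm0⟩ : ∃ i0, i0 < cnt ∧ wmax i0 = m := by
    have := PySem.List.min?_mem hm
    rw [hvals] at this
    obtain ⟨i0, hi0, hq⟩ := List.mem_map.mp this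
    exact ⟨i0, List.mem_range.mp hi0, hq⟩
  have hmin : ∀ i < cnt, m ≤ wmax i := by
    intro i hi
    exact PySem.List.min?_isMin hm (wmax i) (by rw [hvals]; exact List.mem_map_of_mem (List.mem_range.mpr hi))
  -- every window max is ≥ 1 (Pre_)
  have hge1 : ∀ i < cnt, 1 ≤ wmax i := by
    intro i hi
    have hik : i + kk ≤ n := by omega
    obtain ⟨j, hjn, hij, hjk, hj1⟩ := hwin i (by omega) hik
    simp only [hwmax]
    refine (le_winmax_iff stones i kk hkk1 hik 1).mpr ⟨j - i, by omega, ?_⟩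
    have : i + (j - i) = j := by omega
    rw [this]; exact hj1
  have hm1 : 1 ≤ m := by rw [← hwm0]; exact hge1 i0 hi0
  -- global max
  obtain ⟨mx, hmx⟩ : ∃ mx, PySem.List.max? stones (fun x : Int => x) = some mx := by
    cases hq : PySem.List.max? stones (fun x : Int => x) with
    | none => exact absurd ((PySem.List.max?_eq_none_iff _ _).mp hq) hne
    | some q => exact ⟨q, rfl⟩
  have hmxmax : ∀ y ∈ stones, y ≤ mx := fun y hy => PySem.List.max?_isMax hmx y hy
  -- m ≤ mx
  have hmmx : m ≤ mx := by
    have hik : i0 + kk ≤ n := by omega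
    obtain ⟨q, hq⟩ : ∃ q, PySem.List.max? ((stones.drop i0).take kk) (fun x : Int => x) = some q := by
      cases hr : PySem.List.max? ((stones.drop i0).take kk) (fun x : Int => x) with
      | none =>
        exfalso
        have := (PySem.List.max?_eq_none_iff _ _).mp hr
        have hl : ((stones.drop i0).take kk).length = kk := by
          simp [List.length_take, List.length_drop]; omega
        rw [this] at hl; simp at hl; omega
      | some q => exact ⟨q, rfl⟩
    have hqm : wmax i0 = q := by simp only [hwmax, hq, Option.getD_some]
    have hqmem : q ∈ stones := by
      have := PySem.List.max?_mem hq
      exact List.mem_of_mem_drop (List.mem_of_mem_take this)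
    have := hmxmax q hqmem
    omega
  -- the predicate characterization
  have H : ∀ md, 1 ≤ md → md ≤ mx → (innerScan k md stones 0 = false ↔ md ≤ m) := by
    intro md hmd1 hmdmx
    have hfb : innerScan k md stones 0 = false ↔ ¬ winBad stones k.toNat md := by
      rw [← scan_zero_iff md k hk stones]
      simp
    rw [hfb]
    by_cases hkn : k.toNat ≤ n
    · have hkkk : kk = k.toNat := by omega
      constructor
      · intro hnb
        -- md ≤ every window max, hence ≤ m
        rw [← hwm0]
        simp only [hwmax]
        have hik : i0 + kk ≤ n := by omega
        refine (le_winmax_iff stones i0 kk hkk1 hik md).mpr ?_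
        by_contra hnone
        push Not at hnone
        exact hnb ⟨i0, by omega, fun j hj1 hj2 => by
          have := hnone (j - i0) (by omega)
          have hji : i0 + (j - i0) = j := by omega
          rw [hji] at this; omega⟩
      · intro hmdm
        rintro ⟨i, hi, hall⟩
        have hicnt : i < cnt := by omega
        have hik : i + kk ≤ n := by omega
        have := le_trans hmdm (hmin i hicnt)
        simp only [hwmax] at this
        obtain ⟨j, hjk, hjv⟩ := (le_winmax_iff stones i kk hkk1 hik md).mp this
        have := hall (i + j) (by omega) (by omega)
        omega
    · -- k > n: no window of size k.toNat exists, and m = mx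
      have hcnt1 : cnt = 1 := by omega
      have hkeqn : kk = n := by omega
      have hmeqmx : m = mx := by
        rw [← hwm0]
        simp only [hwmax]
        have : (stones.drop i0).take kk = stones := by
          have hi00 : i0 = 0 := by omega
          rw [hi00, List.drop_zero, hkeqn, List.take_of_length_le (by omega)]
        rw [this, hmx]; rfl
      constructor
      · intro _; omega
      · rintro _ ⟨i, hi, _⟩
        omega
  -- binary search returns m
  have hloop : solution stones k = m := by
    simp only [solution, hmx, Option.getD_some]
    exact loopA_eq stones k m mx H hm1 (mx + 1 - 1).toNat 1 mx 0 (by omega) (by omega)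
      (by omega) (by omega) hmmx (Or.inl rfl)
  rw [hloop, hWval]
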